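-- pv_equiv track=rewrite | github.com/MykolaPinchuk/demas_a2_v05 | harness/agent/patch_controller.py | validate_diff_structure
-- ===== SOURCE A (Python) =====
-- def validate_diff_structure(text: str) -> (bool, str):
--     """Lightweight structural validation for a unified diff.
--
--     Checks:
--     - has 'diff --git' header
--     - has '--- ' and '+++ ' after header
--     - has at least one '@@' hunk
--     - within hunks, lines start with one of ' ', '+', '-' (and no other prefixes)
--     """
--     if not isinstance(text, str) or not text.strip():
--         return False, "empty"
--     lines = text.splitlines()
--     if not any(ln.startswith("diff --git ") for ln in lines[:5]):
--         return False, "missing diff header"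
--     # find first header
--     try:
--         idx = next(i for i, ln in enumerate(lines) if ln.startswith("diff --git "))
--     except StopIteration:
--         return False, "missing diff header"
--     window = lines[idx + 1 : idx + 6]
--     if not any(ln.startswith("--- ") for ln in window):
--         return False, "missing --- line"
--     if not any(ln.startswith("+++ ") for ln in window):
--         return False, "missing +++ line"
--     if not any("@@" in ln for ln in lines):
--         return False, "missing hunk header"
--     in_hunk = False
--     for ln in lines:
--         if ln.startswith("@@"):
--             in_hunk = True
--             continue
--         if in_hunk:
--             if ln and not (ln.startswith(" ") or ln.startswith("+") or ln.startswith("-")):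
--                 # allow \ No newline at end of file
--                 if not ln.startswith("\\ No newline at end of file"):
--                     return False, "invalid line prefix in hunk"
--     return True, "ok"
-- ===== SOURCE B (Python) =====
-- def validate_diff_structure(text: str) -> (bool, str):
--     """Single linear pass over the lines; guards evaluated afterwards in A's order."""
--     if not isinstance(text, str) or not text.strip():
--         return False, "empty"
--     found = False          # first 'diff --git ' header seen
--     win = 0                # remaining lines of the 5-line window after the header
--     early = 5              # remaining lines of the 'header must be early' window
--     seen_early = False
--     has_dash = False
--     has_plus = False
--     has_at = False
--     in_hunk = False
--     bad = False
--     for ln in text.splitlines():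
--         if not found and ln.startswith("diff --git "):
--             found = True
--             seen_early = early > 0
--             win = 5
--         elif found and win > 0:
--             win -= 1
--             if ln.startswith("--- "):
--                 has_dash = True
--             if ln.startswith("+++ "):
--                 has_plus = True
--         if early > 0:
--             early -= 1
--         if "@@" in ln:
--             has_at = True
--         if ln.startswith("@@"):
--             in_hunk = True
--         elif in_hunk and ln and not ln.startswith((" ", "+", "-", "\\ No newline at end of file")):
--             bad = True
--     if not seen_early:
--         return False, "missing diff header"
--     if not has_dash:
--         return False, "missing --- line"
--     if not has_plus:
--         return False, "missing +++ line"
--     if not has_at: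
--         return False, "missing hunk header"
--     if bad:
--         return False, "invalid line prefix in hunk"
--     return True, "ok"
-- ===== Notes on version B (the rewrite author's own statement) =====
-- stated objective: alternative
-- what changed: Replaces A's five independent scans over the lines (take-5 any, enumerate-next header search, two window scans, '@@' scan, hunk loop) with one linear pass that records counter-based window flags and a bad-hunk-line flag, then evaluates the guards in A's order.
import Mathlib
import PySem

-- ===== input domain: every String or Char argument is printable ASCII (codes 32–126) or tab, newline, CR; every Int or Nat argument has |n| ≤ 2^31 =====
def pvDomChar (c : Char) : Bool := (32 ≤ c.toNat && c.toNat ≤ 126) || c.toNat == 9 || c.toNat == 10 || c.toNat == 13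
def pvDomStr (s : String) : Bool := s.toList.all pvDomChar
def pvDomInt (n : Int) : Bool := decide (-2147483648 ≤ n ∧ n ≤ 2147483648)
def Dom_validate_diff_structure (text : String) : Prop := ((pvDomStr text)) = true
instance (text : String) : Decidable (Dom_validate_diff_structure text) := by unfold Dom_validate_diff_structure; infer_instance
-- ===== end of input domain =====

-- B replaces A's five independent scans with one linear pass plus the same guard order (objective: alternative).

-- ===== PORT A =====
-- 'ln.startswith("diff --git ")'
def pvHeader (ln : String) : Bool := PySem.Str.startswith ln "diff --git "

-- 'next(i for i, ln in enumerate(lines) if ln.startswith("diff --git "))' (none = StopIteration)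
def pvFindHdr (i : Nat) : List String → Option Nat
  | [] => none
  | ln :: rest => if pvHeader ln then some i else pvFindHdr (i + 1) rest

-- A's final for-loop over lines with the in_hunk flag, returning early on an invalid prefix
def pvHunkLoopA : List String → Bool → Bool × String
  | [], _ => (true, "ok")
  | ln :: rest, inHunk =>
    if PySem.Str.startswith ln "@@" then pvHunkLoopA rest true
    else if inHunk then
      if ln ≠ "" && !(PySem.Str.startswith ln " " || PySem.Str.startswith ln "+" || PySem.Str.startswith ln "-") then
        if !PySem.Str.startswith ln "\\ No newline at end of file" then (false, "invalid line prefix in hunk")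
        else pvHunkLoopA rest inHunk
      else pvHunkLoopA rest inHunk
    else pvHunkLoopA rest inHunk

-- (the isinstance(text, str) test is always true for a String argument and is omitted)
def validate_diff_structure (text : String) : Bool × String :=
  if PySem.Str.strip text = "" then (false, "empty")
  else
    let lines := PySem.Str.splitlines text
    if !(PySem.List.slice lines none (some 5)).any pvHeader then (false, "missing diff header")
    else
      match pvFindHdr 0 lines with
      | none => (false, "missing diff header")
      | some idx =>
        let window := PySem.List.slice lines (some ((idx : Int) + 1)) (some ((idx : Int) + 6))
        if !window.any (fun ln => PySem.Str.startswith ln "--- ") then (false, "missing --- line")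
        else if !window.any (fun ln => PySem.Str.startswith ln "+++ ") then (false, "missing +++ line")
        else if !lines.any (fun ln => PySem.Str.isIn "@@" ln) then (false, "missing hunk header")
        else pvHunkLoopA lines false

-- ===== PORT B =====
structure PvScan where
  found : Bool
  win : Nat
  early : Nat
  seenEarly : Bool
  hasDash : Bool
  hasPlus : Bool
  hasAt : Bool
  inHunk : Bool
  bad : Bool
deriving Repr, DecidableEq

-- 'ln and not ln.startswith((" ", "+", "-", "\\ No newline at end of file"))'
def pvBadLine (ln : String) : Bool :=
  ln ≠ "" && !(PySem.Str.startswith ln " " || PySem.Str.startswith ln "+" ||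
               PySem.Str.startswith ln "-" || PySem.Str.startswith ln "\\ No newline at end of file")

-- the body of B's single for-loop
def pvStep (s : PvScan) (ln : String) : PvScan :=
  let s1 :=
    if !s.found && pvHeader ln then
      { s with found := true, seenEarly := decide (0 < s.early), win := 5 }
    else if s.found && decide (0 < s.win) then
      { s with win := s.win - 1,
               hasDash := s.hasDash || PySem.Str.startswith ln "--- ",
               hasPlus := s.hasPlus || PySem.Str.startswith ln "+++ " }
    else s
  let s2 := { s1 with early := s1.early - 1, hasAt := s1.hasAt || PySem.Str.isIn "@@" ln }
  if PySem.Str.startswith ln "@@" then { s2 with inHunk := true }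
  else { s2 with bad := s2.bad || (s2.inHunk && pvBadLine ln) }

def pvInit : PvScan :=
  { found := false, win := 0, early := 5, seenEarly := false,
    hasDash := false, hasPlus := false, hasAt := false, inHunk := false, bad := false }

def validate_diff_structure_alt (text : String) : Bool × String :=
  if PySem.Str.strip text = "" then (false, "empty")
  else
    let st := (PySem.Str.splitlines text).foldl pvStep pvInit
    if !st.seenEarly then (false, "missing diff header")
    else if !st.hasDash then (false, "missing --- line")
    else if !st.hasPlus then (false, "missing +++ line")
    else if !st.hasAt then (false, "missing hunk header")
    else if st.bad then (false, "invalid line prefix in hunk")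
    else (true, "ok")

-- ===== PRECONDITION & SPEC =====
def Spec_validate_diff_structure (text : String) (out : Bool × String) : Prop := out = validate_diff_structure_alt text
instance (text : String) (out : Bool × String) : Decidable (Spec_validate_diff_structure text out) := by unfold Spec_validate_diff_structure; infer_instance

-- ===== CLAIM (what is proved, stated in full; the proofs are below) =====
def Claim_equal_validate_diff_structure : Prop := ∀ (text : String), Dom_validate_diff_structure text → Spec_validate_diff_structure text (validate_diff_structure text)

-- ===== LEMMAS AND PROOFS =====

-- proof-side: index of the first header line
def pvFhi : List String → Option Nat
  | [] => none
  | ln :: rest => if pvHeader ln then some 0 else (pvFhi rest).map (· + 1)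

-- proof-side: whether A's hunk loop hits an invalid line, as a Bool recursion
def pvBadSpec : Bool → List String → Bool
  | _, [] => false
  | ih, ln :: rest =>
    if PySem.Str.startswith ln "@@" then pvBadSpec true rest
    else (ih && pvBadLine ln) || pvBadSpec ih rest

-- field projections of one step of B's loop
theorem pvStep_found (s : PvScan) (ln : String) :
    (pvStep s ln).found = (s.found || pvHeader ln) := by
  simp only [pvStep]; split_ifs <;> simp_all <;>
    (intro h; cases hf : s.found <;> simp_all)

theorem pvStep_early (s : PvScan) (ln : String) :
    (pvStep s ln).early = s.early - 1 := by
  simp only [pvStep]; split_ifs <;> rfl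

theorem pvStep_seenEarly (s : PvScan) (ln : String) :
    (pvStep s ln).seenEarly =
      (if (!s.found && pvHeader ln) = true then decide (0 < s.early) else s.seenEarly) := by
  simp only [pvStep]; split_ifs <;> simp_all

theorem pvStep_win (s : PvScan) (ln : String) :
    (pvStep s ln).win =
      (if (!s.found && pvHeader ln) = true then 5
       else if (s.found && decide (0 < s.win)) = true then s.win - 1 else s.win) := by
  simp only [pvStep]; split_ifs <;> simp_all

theorem pvStep_hasDash (s : PvScan) (ln : String) :
    (pvStep s ln).hasDash =
      (if (s.found && decide (0 < s.win)) = true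
       then s.hasDash || PySem.Str.startswith ln "--- " else s.hasDash) := by
  simp only [pvStep]; split_ifs <;> simp_all

theorem pvStep_hasPlus (s : PvScan) (ln : String) :
    (pvStep s ln).hasPlus =
      (if (s.found && decide (0 < s.win)) = true
       then s.hasPlus || PySem.Str.startswith ln "+++ " else s.hasPlus) := by
  simp only [pvStep]; split_ifs <;> simp_all

theorem pvStep_hasAt (s : PvScan) (ln : String) :
    (pvStep s ln).hasAt = (s.hasAt || PySem.Str.isIn "@@" ln) := by
  simp only [pvStep]; split_ifs <;> rfl

theorem pvStep_inHunk (s : PvScan) (ln : String) :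
    (pvStep s ln).inHunk = (s.inHunk || PySem.Str.startswith ln "@@") := by
  simp only [pvStep]; split_ifs <;> simp_all

theorem pvStep_bad (s : PvScan) (ln : String) :
    (pvStep s ln).bad =
      (if PySem.Str.startswith ln "@@" = true then s.bad
       else s.bad || (s.inHunk && pvBadLine ln)) := by
  simp only [pvStep]; split_ifs <;> simp_all

theorem pvFindHdr_eq (L : List String) : ∀ i, pvFindHdr i L = (pvFhi L).map (· + i) := by
  induction L with
  | nil => intro i; rfl
  | cons x r ih =>
    intro i
    simp only [pvFindHdr, pvFhi]
    split
    · simp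
    · rw [ih]
      cases pvFhi r <;> simp <;> omega

theorem pvTakeAny_eq (L : List String) : ∀ n : Nat, (L.take n).any pvHeader =
    (match pvFhi L with | none => false | some j => decide (j < n)) := by
  induction L with
  | nil => intro n; simp [pvFhi]
  | cons x r ih =>
    intro n
    cases n with
    | zero =>
      simp only [List.take_zero, List.any_nil]
      cases pvFhi (x :: r) <;> simp
    | succ m =>
      simp only [List.take_succ_cons, List.any_cons, pvFhi]
      by_cases h : pvHeader x
      · simp [h]
      · simp only [h, Bool.false_or, if_false]
        rw [ih]
        cases pvFhi r <;> simp <;> omega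

theorem pvHunkLoopA_eq (L : List String) : ∀ ih : Bool, pvHunkLoopA L ih =
    (if pvBadSpec ih L then (false, "invalid line prefix in hunk") else (true, "ok")) := by
  induction L with
  | nil => intro ih; rfl
  | cons x r IH =>
    intro ih
    simp only [pvHunkLoopA, pvBadSpec]
    by_cases hat : PySem.Str.startswith x "@@" = true
    · simp only [hat, if_true, IH]
    · simp only [hat, Bool.false_eq_true, if_false]
      cases ih with
      | false =>
        simp only [Bool.false_eq_true, if_false, Bool.false_and, Bool.false_or, IH]
      | true =>
        simp only [eq_self_iff_true, if_true, Bool.true_and, pvBadLine]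
        cases hne : (decide (x ≠ "")) with
        | false => simp only [Bool.false_and, Bool.false_eq_true, if_false, Bool.false_or, IH]
        | true =>
          simp only [Bool.true_and]
          cases h1 : PySem.Str.startswith x " " <;>
          cases h2 : PySem.Str.startswith x "+" <;>
          cases h3 : PySem.Str.startswith x "-" <;>
          cases h4 : PySem.Str.startswith x "\\ No newline at end of file" <;>
            simp only [h1, h2, h3, h4, Bool.true_or, Bool.false_or, Bool.or_true, Bool.or_false,
              Bool.not_true, Bool.not_false, Bool.true_and, Bool.and_true, Bool.and_false,
              Bool.false_and, Bool.false_eq_true, if_false, eq_self_iff_true, if_true, IH]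

-- the single-pass invariants: each observed field of the final state, as a function of the list
theorem pvScan_seenEarly (L : List String) : ∀ s : PvScan, (L.foldl pvStep s).seenEarly =
    (if s.found = true then s.seenEarly else
      match pvFhi L with | none => s.seenEarly | some j => decide (j < s.early)) := by
  induction L with
  | nil => intro s; cases h : s.found <;> simp [pvFhi, h]
  | cons x r ih =>
    intro s
    simp only [List.foldl_cons]
    rw [ih, pvStep_found, pvStep_seenEarly, pvStep_early]
    cases hf : s.found
    · cases hh : pvHeader x
      · simp only [pvFhi, hh, Bool.false_or, Bool.not_false, Bool.false_and, Bool.and_false,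
          Bool.false_eq_true, if_false]
        cases pvFhi r <;> simp <;> omega
      · simp only [pvFhi, hh, Bool.false_or, Bool.not_false, Bool.true_and, Bool.and_true,
          Bool.true_eq_false, if_true, Bool.true_eq_false, if_false]
        simp
    · simp only [Bool.true_or, Bool.not_true, Bool.false_and, Bool.false_eq_true, if_false,
        if_true]

theorem pvScan_hasDash (L : List String) : ∀ s : PvScan, (L.foldl pvStep s).hasDash =
    (s.hasDash ||
      (if s.found = true then (L.take s.win).any (fun ln => PySem.Str.startswith ln "--- ")
       else match pvFhi L with
            | none => false
            | some j => ((L.drop (j + 1)).take 5).any (fun ln => PySem.Str.startswith ln "--- "))) := by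
  induction L with
  | nil => intro s; cases h : s.found <;> simp [pvFhi, h]
  | cons x r ih =>
    intro s
    simp only [List.foldl_cons]
    rw [ih, pvStep_found, pvStep_hasDash, pvStep_win]
    cases hf : s.found
    · cases hh : pvHeader x
      · simp only [pvFhi, hh, Bool.false_or, Bool.not_false, Bool.false_and, Bool.and_false,
          Bool.false_eq_true, if_false]
        cases pvFhi r <;> simp
      · simp only [pvFhi, hh, Bool.false_or, Bool.not_false, Bool.true_and, Bool.and_true,
          Bool.false_and, Bool.false_eq_true, Bool.true_eq_false, if_true, if_false,
          List.drop_succ_cons, List.drop_zero]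
    · cases hw : decide (0 < s.win)
      · have hw0 : s.win = 0 := by simpa using hw
        simp only [Bool.true_or, Bool.not_true, Bool.false_and, Bool.true_and, hw,
          Bool.and_false, Bool.false_eq_true, if_false, if_true, hw0, List.take_zero,
          List.any_nil]
      · obtain ⟨m, hm⟩ : ∃ m, s.win = m + 1 := ⟨s.win - 1, by
          have := of_decide_eq_true hw; omega⟩
        simp only [Bool.true_or, Bool.not_true, Bool.false_and, Bool.true_and, hw,
          Bool.and_true, Bool.false_eq_true, if_false, if_true, hm, Nat.add_sub_cancel,
          List.take_succ_cons, List.any_cons, Bool.or_assoc]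

theorem pvScan_hasPlus (L : List String) : ∀ s : PvScan, (L.foldl pvStep s).hasPlus =
    (s.hasPlus ||
      (if s.found = true then (L.take s.win).any (fun ln => PySem.Str.startswith ln "+++ ")
       else match pvFhi L with
            | none => false
            | some j => ((L.drop (j + 1)).take 5).any (fun ln => PySem.Str.startswith ln "+++ "))) := by
  induction L with
  | nil => intro s; cases h : s.found <;> simp [pvFhi, h]
  | cons x r ih =>
    intro s
    simp only [List.foldl_cons]
    rw [ih, pvStep_found, pvStep_hasPlus, pvStep_win]
    cases hf : s.found
    · cases hh : pvHeader x
      · simp only [pvFhi, hh, Bool.false_or, Bool.not_false, Bool.false_and, Bool.and_false,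
          Bool.false_eq_true, if_false]
        cases pvFhi r <;> simp
      · simp only [pvFhi, hh, Bool.false_or, Bool.not_false, Bool.true_and, Bool.and_true,
          Bool.false_and, Bool.false_eq_true, Bool.true_eq_false, if_true, if_false,
          List.drop_succ_cons, List.drop_zero]
    · cases hw : decide (0 < s.win)
      · have hw0 : s.win = 0 := by simpa using hw
        simp only [Bool.true_or, Bool.not_true, Bool.false_and, Bool.true_and, hw,
          Bool.and_false, Bool.false_eq_true, if_false, if_true, hw0, List.take_zero,
          List.any_nil]
      · obtain ⟨m, hm⟩ : ∃ m, s.win = m + 1 := ⟨s.win - 1, by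
          have := of_decide_eq_true hw; omega⟩
        simp only [Bool.true_or, Bool.not_true, Bool.false_and, Bool.true_and, hw,
          Bool.and_true, Bool.false_eq_true, if_false, if_true, hm, Nat.add_sub_cancel,
          List.take_succ_cons, List.any_cons, Bool.or_assoc]

theorem pvScan_hasAt (L : List String) : ∀ s : PvScan, (L.foldl pvStep s).hasAt =
    (s.hasAt || L.any (fun ln => PySem.Str.isIn "@@" ln)) := by
  induction L with
  | nil => intro s; simp
  | cons x r ih =>
    intro s
    simp only [List.foldl_cons]
    rw [ih, pvStep_hasAt]
    simp [Bool.or_assoc]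

theorem pvScan_bad (L : List String) : ∀ s : PvScan, (L.foldl pvStep s).bad =
    (s.bad || pvBadSpec s.inHunk L) := by
  induction L with
  | nil => intro s; simp [pvBadSpec]
  | cons x r ih =>
    intro s
    simp only [List.foldl_cons]
    rw [ih, pvStep_bad, pvStep_inHunk, pvBadSpec]
    by_cases hat : PySem.Str.startswith x "@@" = true
    · rw [if_pos hat, if_pos hat, hat, Bool.or_true]
    · rw [if_neg hat, if_neg hat, eq_false_of_ne_true hat, Bool.or_false, Bool.or_assoc]

-- ===== VERDICT (by name: the statement is the Claim_ definition above) =====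
theorem validate_diff_structure_spec : Claim_equal_validate_diff_structure := by
  intro text _
  unfold Spec_validate_diff_structure validate_diff_structure validate_diff_structure_alt
  by_cases hs : PySem.Str.strip text = ""
  · simp [hs]
  · simp only [hs, if_false]
    generalize PySem.Str.splitlines text = L
    rw [PySem.List.slice_to L (by norm_num)]
    have htake : (5 : Int).toNat = 5 := rfl
    rw [htake, pvTakeAny_eq, pvFindHdr_eq]
    rw [pvScan_seenEarly, pvScan_hasDash, pvScan_hasPlus, pvScan_hasAt, pvScan_bad]
    simp only [pvInit]
    cases hF : pvFhi L with
    | none => simp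
    | some j =>
      simp only [Option.map_some]
      by_cases hj : j < 5
      · have hslice : PySem.List.slice L (some ((↑(j + 0) : Int) + 1)) (some ((↑(j + 0) : Int) + 6)) =
            (L.drop (j + 1)).take 5 := by
          have h1 : ((↑(j + 0) : Int) + 1) = ((j + 1 : Nat) : Int) := by push_cast; ring
          have h6 : ((↑(j + 0) : Int) + 6) = ((j + 1 : Nat) : Int) + ((5 : Nat) : Int) := by
            push_cast; ring
          rw [h1, h6, PySem.List.slice_natCast_add]
        simp only [hslice, hj, decide_true, Bool.not_true, if_true, Bool.false_or,
          Bool.not_false, Bool.false_eq_true, if_false]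
        cases hd : ((L.drop (j + 1)).take 5).any (fun ln => PySem.Str.startswith ln "--- ") <;>
        cases hp : ((L.drop (j + 1)).take 5).any (fun ln => PySem.Str.startswith ln "+++ ") <;>
        cases ha : L.any (fun ln => PySem.Str.isIn "@@" ln) <;>
        cases hb : pvBadSpec false L <;>
          simp only [hd, hp, ha, hb, pvHunkLoopA_eq, Bool.not_true, Bool.not_false,
            Bool.false_eq_true, Bool.true_eq_false, eq_self_iff_true, if_true, if_false]
      · simp [hj]
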